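-- pv_equiv track=rewrite | github.com/ElPlusPlus/epp-zoe | pyzoe/utils.py | encode_string_to_registers
-- ===== SOURCE A (Python) =====
-- from typing import List
--
-- def encode_string_to_registers(value: str, count: int) -> List[int]:
--     """Convert string to list of registers"""
--     # Pad string to even length if necessary
--     if len(value) % 2:
--         value += '\0'
--
--     registers = []
--     # Process two characters at a time
--     for i in range(0, len(value), 2):
--         high_byte = ord(value[i])
--         # If there's a second character, use it; otherwise use null byte
--         low_byte = ord(value[i + 1]) if i + 1 < len(value) else 0
--         register = (high_byte << 8) | low_byte
--         registers.append(register)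
--
--     # Pad with zeros if necessary to match expected count
--     while len(registers) < count:
--         registers.append(0)
--
--     return registers[:count]  # Truncate if string was too long
-- ===== SOURCE B (Python) =====
-- def encode_string_to_registers(value, count):
--     """Convert string to list of registers: one comprehension over output positions."""
--     n = len(value)
--     return [(((ord(value[2 * i]) << 8) | (ord(value[2 * i + 1]) if 2 * i + 1 < n else 0))
--              if 2 * i < n else 0)
--             for i in range(count)]
-- ===== Notes on version B (the rewrite author's own statement) =====
-- stated objective: simpler
-- what changed: A's three phases (pad string to even length, pair-loop appending registers, while-loop zero padding, final slice truncation) are replaced by a single comprehension over the count output positions that reads characters with bounds guards.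
-- outside the precondition, e.g. on encode_string_to_registers('abcd', -1): A returns [24930], B returns []
import Mathlib
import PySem

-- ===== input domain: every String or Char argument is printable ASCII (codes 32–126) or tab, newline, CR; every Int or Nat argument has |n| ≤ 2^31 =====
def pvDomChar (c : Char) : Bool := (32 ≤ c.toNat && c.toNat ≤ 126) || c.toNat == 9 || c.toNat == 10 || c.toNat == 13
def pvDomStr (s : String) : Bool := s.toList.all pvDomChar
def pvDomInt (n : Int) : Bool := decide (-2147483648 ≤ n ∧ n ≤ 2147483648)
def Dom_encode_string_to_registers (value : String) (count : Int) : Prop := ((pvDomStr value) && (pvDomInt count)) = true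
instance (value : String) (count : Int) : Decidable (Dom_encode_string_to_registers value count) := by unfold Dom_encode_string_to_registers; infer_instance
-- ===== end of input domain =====

-- B replaces A's four phases (even-pad, pair loop, while zero-pad, slice truncate) by one
-- comprehension over the count output positions; equal return values for count ≥ 0.

-- ===== PORT A =====
-- the pair loop 'for i in range(0, len(value), 2)' as the structural recursion two chars at a time
def pvPairsA : List Char → List Int
  | a :: b :: rest => Int.lor ((a.toNat : Int) <<< 8) (b.toNat : Int) :: pvPairsA rest
  | [a] => [Int.lor ((a.toNat : Int) <<< 8) 0]   -- i + 1 < len fails: low byte 0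
  | [] => []

-- 'while len(registers) < count: registers.append(0)'
def pvPadA (regs : List Int) (count : Int) : List Int :=
  if (regs.length : Int) < count then pvPadA (regs ++ [0]) count else regs
termination_by (count - regs.length).toNat
decreasing_by simp; omega

def encode_string_to_registers (value : String) (count : Int) : List Int :=
  let cs := value.toList
  let cs := if cs.length % 2 ≠ 0 then cs ++ ['\x00'] else cs
  PySem.List.slice (pvPadA (pvPairsA cs) count) none (some count)

-- ===== PORT B =====
def encode_string_to_registers_alt (value : String) (count : Int) : List Int :=
  let cs := value.toList
  let n : Int := cs.length
  (PySem.List.pyRange 0 count 1).map (fun i =>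
    if 2 * i < n then
      Int.lor (((PySem.List.pyGetD cs (2 * i) '\x00').toNat : Int) <<< 8)
        (if 2 * i + 1 < n then ((PySem.List.pyGetD cs (2 * i + 1) '\x00').toNat : Int) else 0)
    else 0)

-- ===== PRECONDITION & SPEC =====
-- Pre_ restricts to the natural domain count ≥ 0: a negative register count is not a
-- meaningful request for this encoder; there A's `registers[:count]` drops registers from
-- the end while B returns [], and neither behaviour is specified.
def Pre_encode_string_to_registers (value : String) (count : Int) : Prop := 0 ≤ count
instance (value : String) (count : Int) : Decidable (Pre_encode_string_to_registers value count) := by unfold Pre_encode_string_to_registers; infer_instance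
def pvWitness_encode_string_to_registers : String × Int := ("abc", 3)

def Spec_encode_string_to_registers (value : String) (count : Int) (out : List Int) : Prop := out = encode_string_to_registers_alt value count
instance (value : String) (count : Int) (out : List Int) : Decidable (Spec_encode_string_to_registers value count out) := by unfold Spec_encode_string_to_registers; infer_instance

-- ===== CLAIM =====
def Claim_equal_encode_string_to_registers : Prop := ∀ (value : String) (count : Int), Dom_encode_string_to_registers value count → Pre_encode_string_to_registers value count → Spec_encode_string_to_registers value count (encode_string_to_registers value count)

-- ===== LEMMAS AND PROOFS =====

lemma pvPairsA_length : ∀ cs : List Char, (pvPairsA cs).length = (cs.length + 1) / 2 := by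
  intro cs
  fun_induction pvPairsA cs with
  | case1 a b rest ih => simp [ih]; omega
  | case2 a => simp
  | case3 => simp

lemma pvPairsA_get : ∀ (cs : List Char) (j : Nat),
    (pvPairsA cs)[j]? = (cs[2 * j]?).map (fun a =>
      Int.lor ((a.toNat : Int) <<< 8)
        (((cs[2 * j + 1]?).map (fun b => (b.toNat : Int))).getD 0)) := by
  intro cs
  fun_induction pvPairsA cs with
  | case1 a b rest ih =>
    intro j
    cases j with
    | zero => simp
    | succ k =>
      have e1 : 2 * (k + 1) = 2 * k + 1 + 1 := by omega
      have e2 : 2 * (k + 1) + 1 = (2 * k + 1) + 1 + 1 := by omega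
      simp only [List.getElem?_cons_succ, e1, ih k]
  | case2 a =>
    intro j
    cases j with
    | zero => simp
    | succ k =>
      have e1 : 2 * (k + 1) = 2 * k + 1 + 1 := by omega
      simp [e1]
  | case3 => intro j; simp

lemma pvPadA_eq_aux : ∀ (n : Nat) (regs : List Int) (count : Int),
    (count - regs.length).toNat = n → pvPadA regs count = regs ++ List.replicate n 0 := by
  intro n
  induction n with
  | zero =>
    intro regs count h
    rw [pvPadA, if_neg (by omega)]
    simp
  | succ k ih =>
    intro regs count h
    have hlt : (regs.length : Int) < count := by omega
    rw [pvPadA, if_pos hlt, ih (regs ++ [0]) count (by simp; omega), List.append_assoc]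
    simp [List.replicate_succ]

lemma pvPadA_eq (regs : List Int) (count : Int) :
    pvPadA regs count = regs ++ List.replicate (count - regs.length).toNat 0 :=
  pvPadA_eq_aux _ regs count rfl

theorem pv_main (value : String) (count : Int) (hc : 0 ≤ count) :
    encode_string_to_registers value count = encode_string_to_registers_alt value count := by
  unfold encode_string_to_registers encode_string_to_registers_alt
  dsimp only
  set cs := value.toList with hcs
  set L := cs.length with hL
  rw [PySem.List.slice_to _ hc, pvPadA_eq, PySem.List.pyRange_one, List.map_map]
  set cs' := if L % 2 ≠ 0 then cs ++ ['\x00'] else cs with hcs'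
  have hL' : cs'.length = if L % 2 ≠ 0 then L + 1 else L := by
    rw [hcs']
    split_ifs with h1 <;> simp_all
  have hregs : (pvPairsA cs').length = (L + 1) / 2 := by
    rw [pvPairsA_length, hL']; split_ifs <;> omega
  apply List.ext_getElem
  · simp [hregs]; omega
  · intro j hj1 hj2
    simp only [List.length_map, List.length_range] at hj2
    rw [List.getElem_take, List.getElem_map, List.getElem_range]
    simp only [Function.comp_apply, zero_add]
    by_cases hjr : j < (L + 1) / 2
    · have h2j : 2 * j < cs'.length := by rw [hL']; split_ifs <;> omega
      have h2jL : 2 * j < L := by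
        rcases Nat.even_or_odd L with he | ho
        · obtain ⟨t, ht⟩ := he; omega
        · obtain ⟨t, ht⟩ := ho; omega
      rw [List.getElem_append_left (by omega)]
      have hget := pvPairsA_get cs' j
      rw [List.getElem?_eq_getElem (by omega), List.getElem?_eq_getElem h2j] at hget
      simp only [Option.map_some] at hget
      rw [Option.some_inj] at hget
      rw [hget]
      rw [if_pos (show 2 * (j : Int) < (L : Int) by omega)]
      have hcast2 : (2 * (j : Int)) = ((2 * j : Nat) : Int) := by push_cast; ring
      have hcast3 : (2 * (j : Int) + 1) = ((2 * j + 1 : Nat) : Int) := by push_cast; ring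
      rw [hcast3, hcast2, PySem.List.pyGetD_natCast, PySem.List.pyGetD_natCast]
      have hcshigh : cs'[2 * j]'h2j = cs[2 * j]'h2jL := by
        have hq : cs'[2 * j]? = cs[2 * j]? := by
          rw [hcs']
          split_ifs with h
          · rw [List.getElem?_append_left h2jL]
          · rfl
        rw [List.getElem?_eq_getElem h2j, List.getElem?_eq_getElem h2jL] at hq
        exact Option.some_inj.mp hq
      rw [hcshigh, List.getD_eq_getElem?_getD, List.getElem?_eq_getElem h2jL, Option.getD_some]
      congr 1
      by_cases hlow : 2 * j + 1 < L
      · rw [if_pos (show ((2 * j + 1 : Nat) : Int) < (L : Int) by omega)]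
        have h1' : 2 * j + 1 < cs'.length := by rw [hL']; split_ifs <;> omega
        have hcslow : cs'[2 * j + 1]'h1' = cs[2 * j + 1]'hlow := by
          have hq : cs'[2 * j + 1]? = cs[2 * j + 1]? := by
            rw [hcs']
            split_ifs with h
            · rw [List.getElem?_append_left hlow]
            · rfl
          rw [List.getElem?_eq_getElem h1', List.getElem?_eq_getElem hlow] at hq
          exact Option.some_inj.mp hq
        rw [List.getElem?_eq_getElem h1', List.getD_eq_getElem?_getD,
          List.getElem?_eq_getElem hlow, Option.getD_some, hcslow]
        simp
      · rw [if_neg (show ¬ ((2 * j + 1 : Nat) : Int) < (L : Int) by omega)]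
        by_cases hodd : 2 * j + 1 < cs'.length
        · have hLodd : L % 2 ≠ 0 := by
            rw [hL'] at hodd
            split_ifs at hodd with h
            · exact h
            · omega
          have h2j1 : 2 * j + 1 = L := by
            rw [hL'] at hodd; rw [if_pos hLodd] at hodd; omega
          have hnull : cs'[2 * j + 1]? = some '\x00' := by
            rw [hcs', if_pos hLodd, List.getElem?_append_right (by omega)]
            have hz : 2 * j + 1 - cs.length = 0 := by omega
            rw [hz]
            rfl
          rw [hnull]
          simp
        · rw [List.getElem?_eq_none (by omega)]
          simp
    · rw [if_neg (show ¬ 2 * (j : Int) < (L : Int) by omega)]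
      rw [List.getElem_append_right (by simp [hregs]; omega)]
      simp

-- ===== VERDICT =====
theorem encode_string_to_registers_spec : Claim_equal_encode_string_to_registers := by
  intro value count _hdom hpre
  unfold Spec_encode_string_to_registers
  exact (pv_main value count hpre)
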